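-- pv_equiv track=rewrite | github.com/openbraininstitute/brainbuilder | brainbuilder/utils/sonata/convert_allen_v1.py | ranges_per_node
-- ===== SOURCE A (Python) =====
-- def ranges_per_node(node_to_edge_ids):
--     """Given list of [edge_ids], return list of [start, end) ranges.
--     e.g. [[[0,3], [3,5], [5,8]], [[9,10]]] -> [[0,3],[3,4]]
--     Range 0 -> ids[0,3), Range 1 -> ids[3,4), etc.]
--     """
--     res = []
--     start = 0
--     for ranges in node_to_edge_ids.values():
--         n_ranges = len(ranges)
--         end = start + n_ranges
--         if n_ranges == 0:
--             res.append([0, 0])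
--         else:
--             res.append([start, end])
--         start = end
--     return res
-- ===== SOURCE B (Python) =====
-- def ranges_per_node(node_to_edge_ids):
--     """Given list of [edge_ids], return list of [start, end) ranges."""
--     vals = list(node_to_edge_ids.values())
--     return [
--         [0, 0] if not v else
--         [sum(len(u) for u in vals[:i]), sum(len(u) for u in vals[:i + 1])]
--         for i, v in enumerate(vals)
--     ]
-- ===== Notes on version B (the rewrite author's own statement) =====
-- stated objective: alternative
-- what changed: Drops the running-start accumulator entirely: each row is computed independently and statelessly as [sum of lengths of the preceding value lists, sum including the current one], a naive per-index recomputation (O(n^2)) instead of A's single threaded-state loop.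
import Mathlib
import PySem

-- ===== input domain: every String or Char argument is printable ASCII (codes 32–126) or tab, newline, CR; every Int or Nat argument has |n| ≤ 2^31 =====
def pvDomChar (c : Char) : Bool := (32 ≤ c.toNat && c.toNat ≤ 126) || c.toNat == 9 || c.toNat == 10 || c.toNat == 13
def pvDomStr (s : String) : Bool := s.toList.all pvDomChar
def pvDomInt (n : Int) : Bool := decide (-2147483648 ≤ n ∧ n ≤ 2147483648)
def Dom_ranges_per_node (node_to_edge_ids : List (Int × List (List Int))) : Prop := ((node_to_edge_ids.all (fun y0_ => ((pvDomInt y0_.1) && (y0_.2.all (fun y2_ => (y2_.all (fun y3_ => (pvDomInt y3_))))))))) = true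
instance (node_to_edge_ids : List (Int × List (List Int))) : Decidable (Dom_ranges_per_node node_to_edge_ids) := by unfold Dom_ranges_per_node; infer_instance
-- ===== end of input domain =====

-- B drops A's running-start accumulator: each row is recomputed independently from the lengths
-- of all preceding value lists (stateless per-index recomputation, O(n^2)); alternative, not faster.
-- ===== PORT A =====
-- loop body of A: (res, start) updated by one node's ranges
def pvStepA (acc : List (List Int) × Int) (kv : Int × List (List Int)) : List (List Int) × Int :=
  let n_ranges : Int := (kv.2.length : Int)
  let «end» : Int := acc.2 + n_ranges
  if n_ranges = 0 then (acc.1 ++ [[0, 0]], «end»)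
  else (acc.1 ++ [[acc.2, «end»]], «end»)

def ranges_per_node (node_to_edge_ids : List (Int × List (List Int))) : List (List Int) :=
  (node_to_edge_ids.foldl pvStepA ([], 0)).1

-- ===== PORT B =====
-- sum(len(u) for u in ...) of Source B
def pvSumLen (vals : List (List (List Int))) : Int :=
  (vals.map (fun u => (u.length : Int))).sum

-- vals[:i] for the nonnegative index i coming from enumerate: exact as List.take i.toNat
def ranges_per_node_alt (node_to_edge_ids : List (Int × List (List Int))) : List (List Int) :=
  let vals : List (List (List Int)) := node_to_edge_ids.map (fun kv => kv.2)
  (PySem.List.enumerate vals).map (fun iv =>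
    if iv.2 = [] then [0, 0]
    else [pvSumLen (vals.take iv.1.toNat), pvSumLen (vals.take (iv.1.toNat + 1))])

-- ===== PRECONDITION & SPEC =====
def Spec_ranges_per_node (node_to_edge_ids : List (Int × List (List Int))) (out : List (List Int)) : Prop := out = ranges_per_node_alt node_to_edge_ids
instance (node_to_edge_ids : List (Int × List (List Int))) (out : List (List Int)) : Decidable (Spec_ranges_per_node node_to_edge_ids out) := by unfold Spec_ranges_per_node; infer_instance

-- ===== CLAIM (what is proved, stated in full; the proofs are below) =====
def Claim_equal_ranges_per_node : Prop := ∀ (node_to_edge_ids : List (Int × List (List Int))), Dom_ranges_per_node node_to_edge_ids → Spec_ranges_per_node node_to_edge_ids (ranges_per_node node_to_edge_ids)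

-- ===== LEMMAS AND PROOFS =====

-- common reference shape: the rows emitted from offset s over the length list
def pvGo (s : Int) (lens : List Int) : List (List Int) :=
  match lens with
  | [] => []
  | n :: rest => (if n = 0 then [0, 0] else [s, s + n]) :: pvGo (s + n) rest

theorem pvA_foldl (l : List (Int × List (List Int))) (acc : List (List Int)) (s : Int) :
    (l.foldl pvStepA (acc, s)).1 = acc ++ pvGo s (l.map (fun kv => (kv.2.length : Int))) := by
  induction l generalizing acc s with
  | nil => simp [pvGo]
  | cons kv t ih =>
    simp only [List.foldl_cons, List.map_cons, pvGo]
    by_cases h : (kv.2.length : Int) = 0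
    · have h' : kv.2 = [] := by simpa using h
      rw [show pvStepA (acc, s) kv = (acc ++ [[0, 0]], s + (kv.2.length : Int)) by
        simp [pvStepA, h'], ih]
      simp [h']
    · have h' : ¬ kv.2 = [] := by simpa using h
      rw [show pvStepA (acc, s) kv = (acc ++ [[s, s + (kv.2.length : Int)]], s + (kv.2.length : Int)) by
        simp [pvStepA, h'], ih]
      simp [h']

theorem pvB_key (pre vals : List (List (List Int))) :
    (PySem.List.enumerate vals (pre.length : Int)).map (fun iv =>
        if iv.2 = [] then [0, 0]
        else [pvSumLen ((pre ++ vals).take iv.1.toNat),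
              pvSumLen ((pre ++ vals).take (iv.1.toNat + 1))])
      = pvGo (pvSumLen pre) (vals.map (fun v => (v.length : Int))) := by
  induction vals generalizing pre with
  | nil => simp [pvGo, PySem.List.enumerate_nil]
  | cons v t ih =>
    rw [PySem.List.enumerate_cons, List.map_cons, List.map_cons, pvGo]
    refine congrArg₂ List.cons ?_ ?_
    · have h1 : ((pre.length : Int)).toNat = pre.length := by simp
      have h2 : (pre ++ v :: t).take pre.length = pre := by
        simp
      have h3 : (pre ++ v :: t).take (pre.length + 1) = pre ++ [v] := by
        rw [show pre ++ v :: t = (pre ++ [v]) ++ t by simp]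
        rw [List.take_append_of_le_length (by simp)]
        simp
      by_cases hv : v = []
      · simp [hv]
      · have : ¬ ((v.length : Int) = 0) := by simpa using hv
        simp only [hv, this, h1, h2, h3]
        simp [pvSumLen]
    · have := ih (pre ++ [v])
      have hlen : ((pre ++ [v]).length : Int) = (pre.length : Int) + 1 := by simp
      rw [hlen] at this
      rw [show (pre ++ [v]) ++ t = pre ++ v :: t by simp] at this
      rw [show pvSumLen (pre ++ [v]) = pvSumLen pre + (v.length : Int) by
        simp [pvSumLen]] at this
      exact this

-- ===== VERDICT (by name: the statement is the Claim_ definition above) =====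
theorem ranges_per_node_spec : Claim_equal_ranges_per_node := by
  intro l _
  unfold Spec_ranges_per_node ranges_per_node ranges_per_node_alt
  rw [pvA_foldl l [] 0]
  have h := pvB_key [] (l.map (fun kv => kv.2))
  simpa [pvSumLen, Function.comp] using h.symm
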